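-- pv_equiv track=rewrite | github.com/sumin305/My-Algorithm | 프로그래머스/lv1/42840. 모의고사/모의고사.py | solution
-- ===== SOURCE A (Python) =====
-- def solution(answers):
--     answer = []
--     math_give_up_1 = [1,2,3,4,5]
--     math_give_up_2 = [2,1,2,3,2,4,2,5]
--     math_give_up_3 = [3,3,1,1,2,2,4,4,5,5]
--     count_1 = count_2 = count_3 = 0
--     idx_1 = idx_2 = idx_3 = 0
--     for ans in answers:
--         if ans == math_give_up_1[idx_1]:
--             count_1 += 1
--         if ans == math_give_up_2[idx_2]:
--             count_2 += 1
--         if ans == math_give_up_3[idx_3]: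
--             count_3 += 1
--         idx_1 += 1
--         idx_2 += 1
--         idx_3 += 1
--         if idx_1 == 5:
--             idx_1 = 0
--         if idx_2 == 8:
--             idx_2 = 0
--         if idx_3 == 10:
--             idx_3 = 0
--     max_math = max(count_1, count_2, count_3)
--     for (idx, math) in enumerate([count_1, count_2, count_3]):
--         if max_math == math:
--             answer.append(idx+1)
--
--     return sorted(answer)
-- ===== SOURCE B (Python) =====
-- def _score(hist, pattern):
--     # total hits for this pattern: 40 histogram lookups, no scan over answers
--     return sum(hist.get((r, pattern[r % len(pattern)]), 0) for r in range(40))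
--
-- def solution(answers):
--     # histogram of answers keyed by (position mod 40, value); 40 = lcm(5, 8, 10),
--     # so each pattern's prediction is a function of the position mod 40 alone
--     hist = {}
--     for i, a in enumerate(answers):
--         key = (i % 40, a)
--         hist[key] = hist.get(key, 0) + 1
--     s1 = _score(hist, [1, 2, 3, 4, 5])
--     s2 = _score(hist, [2, 1, 2, 3, 2, 4, 2, 5])
--     s3 = _score(hist, [3, 3, 1, 1, 2, 2, 4, 4, 5, 5])
--     best = max(s1, s2, s3)
--     return [k for k, s in ((1, s1), (2, s2), (3, s3)) if s == best]
-- ===== Notes on version B (the rewrite author's own statement) =====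
-- stated objective: alternative
-- what changed: B never compares answers against the patterns while scanning: it builds a histogram dict keyed by (position mod 40, answer) in one pass (40 = lcm of the pattern lengths), then computes each pattern's score as a sum of 40 histogram lookups and collects the argmax indices; A instead interleaves three guarded counters with manually wrapped indices in a single loop and sorts the result.
import Mathlib
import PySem

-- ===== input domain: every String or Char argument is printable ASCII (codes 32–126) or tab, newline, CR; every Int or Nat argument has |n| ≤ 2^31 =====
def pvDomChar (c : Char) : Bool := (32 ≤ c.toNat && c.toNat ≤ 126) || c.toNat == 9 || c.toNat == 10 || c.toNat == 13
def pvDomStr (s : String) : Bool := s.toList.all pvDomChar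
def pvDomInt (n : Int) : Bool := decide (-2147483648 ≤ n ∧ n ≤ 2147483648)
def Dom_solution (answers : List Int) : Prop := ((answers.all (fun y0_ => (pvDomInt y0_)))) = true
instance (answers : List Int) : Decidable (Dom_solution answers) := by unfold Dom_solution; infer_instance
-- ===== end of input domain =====

-- B replaces A's interleaved three-counter loop by a (position mod 40, answer) histogram built
-- in one pass plus three 40-lookup table sums (40 = lcm 5 8 10); an alternative algorithm, not faster.

-- ===== PORT A =====
-- the body of A's single for-loop: three guarded counters and three manually wrapped indices
def stepA (s : Int × Int × Int × Nat × Nat × Nat) (ans : Int) : Int × Int × Int × Nat × Nat × Nat :=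
  let (c1, c2, c3, i1, i2, i3) := s
  let c1 := if ans = ([1,2,3,4,5] : List Int).getD i1 0 then c1 + 1 else c1
  let c2 := if ans = ([2,1,2,3,2,4,2,5] : List Int).getD i2 0 then c2 + 1 else c2
  let c3 := if ans = ([3,3,1,1,2,2,4,4,5,5] : List Int).getD i3 0 then c3 + 1 else c3
  let i1 := i1 + 1
  let i2 := i2 + 1
  let i3 := i3 + 1
  let i1 := if i1 = 5 then 0 else i1
  let i2 := if i2 = 8 then 0 else i2
  let i3 := if i3 = 10 then 0 else i3
  (c1, c2, c3, i1, i2, i3)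

def solution (answers : List Int) : List Int :=
  let st := answers.foldl stepA (0, 0, 0, 0, 0, 0)
  let (c1, c2, c3, _, _, _) := st
  let maxMath := max (max c1 c2) c3
  let answer := (PySem.List.enumerate [c1, c2, c3]).foldl
    (fun acc p => if maxMath = p.2 then acc ++ [p.1 + 1] else acc) []
  PySem.List.sorted answer (fun x => x) false

-- ===== PORT B =====
-- hist[key] = hist.get(key, 0) + 1 over enumerate(answers), key = (i % 40, a)
def histOf (answers : List Int) : PySem.Dict (Int × Int) Int :=
  (PySem.List.enumerate answers).foldl
    (fun d p => d.insert (PySem.Int.mod p.1 40, p.2) (d.getD (PySem.Int.mod p.1 40, p.2) 0 + 1))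
    PySem.Dict.empty

-- sum(hist.get((r, pattern[r % len(pattern)]), 0) for r in range(40));
-- pattern[r % len(pattern)]: the index is always in range, so the Option default is never used
def pyScore (hist : PySem.Dict (Int × Int) Int) (pattern : List Int) : Int :=
  (PySem.List.pyRange 0 40 1).foldl
    (fun s r => s + hist.getD
      (r, (PySem.List.pyGet? pattern (PySem.Int.mod r (pattern.length : Int))).getD 0) 0) 0

def solution_alt (answers : List Int) : List Int :=
  let hist := histOf answers
  let s1 := pyScore hist [1,2,3,4,5]
  let s2 := pyScore hist [2,1,2,3,2,4,2,5]
  let s3 := pyScore hist [3,3,1,1,2,2,4,4,5,5]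
  let best := max (max s1 s2) s3
  (([(1,s1),(2,s2),(3,s3)] : List (Int × Int)).filter (fun p => p.2 = best)).map (fun p => p.1)

-- ===== PRECONDITION & SPEC =====
def Spec_solution (answers : List Int) (out : List Int) : Prop := out = solution_alt answers
instance (answers : List Int) (out : List Int) : Decidable (Spec_solution answers out) := by unfold Spec_solution; infer_instance

-- ===== CLAIM (what is proved, stated in full; the proofs are below) =====
def Claim_equal_solution : Prop := ∀ (answers : List Int), Dom_solution answers → Spec_solution answers (solution answers)

-- ===== LEMMAS AND PROOFS =====

-- one counter of A's loop, isolated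
def countA (g : List Int) (c : Int) (i : Nat) : List Int → Int
  | [] => c
  | a :: l => countA g (if a = g.getD i 0 then c + 1 else c) (if i + 1 = g.length then 0 else i + 1) l

-- one wrapped index of A's loop, isolated
def idxA (n i : Nat) : List Int → Nat
  | [] => i
  | _ :: l => idxA n (if i + 1 = n then 0 else i + 1) l

lemma foldA (l : List Int) : ∀ c1 c2 c3 i1 i2 i3,
    l.foldl stepA (c1, c2, c3, i1, i2, i3) =
      (countA [1,2,3,4,5] c1 i1 l, countA [2,1,2,3,2,4,2,5] c2 i2 l,
       countA [3,3,1,1,2,2,4,4,5,5] c3 i3 l, idxA 5 i1 l, idxA 8 i2 l, idxA 10 i3 l) := by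
  induction l with
  | nil => intro c1 c2 c3 i1 i2 i3; simp [countA, idxA]
  | cons a l ih => intro c1 c2 c3 i1 i2 i3; simp [stepA, countA, idxA, ih]

lemma mod_succ (j n : Nat) (h : 0 < n) :
    (if j % n + 1 = n then 0 else j % n + 1) = (j + 1) % n := by
  have hlt := Nat.mod_lt j h
  have key : (j + 1) % n = (j % n + 1 % n) % n := Nat.add_mod j 1 n
  by_cases h1 : n = 1
  · subst h1; simp [Nat.mod_one]
  · rw [Nat.mod_eq_of_lt (show 1 < n by omega)] at key
    by_cases he : j % n + 1 = n
    · rw [if_pos he, key, he, Nat.mod_self]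
    · rw [if_neg he, key, Nat.mod_eq_of_lt (show j % n + 1 < n by omega)]

lemma countA_eq (g : List Int) (hg : 0 < g.length) (l : List Int) : ∀ (j : Nat) (c : Int),
    countA g c (j % g.length) l =
      c + (((l.zipIdx j).countP (fun p => p.1 = g.getD (p.2 % g.length) 0) : Nat) : Int) := by
  induction l with
  | nil => intro j c; simp [countA]
  | cons a l ih =>
    intro j c
    simp only [countA, mod_succ j g.length hg, ih (j + 1), List.zipIdx_cons, List.countP_cons,
      decide_eq_true_eq]
    split_ifs <;> push_cast <;> ring

lemma countA_eq' (g : List Int) (hg : 0 < g.length) (l : List Int) :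
    countA g 0 0 l = ((l.zipIdx.countP (fun p => p.1 = g.getD (p.2 % g.length) 0) : Nat) : Int) := by
  have := countA_eq g hg l 0 0
  simpa [List.zipIdx] using this

-- pulling a constant out of an accumulating fold
lemma foldl_shift (h : Int → Int) : ∀ (rs : List Int) (c e : Int),
    rs.foldl (fun s r => s + h r) (c + e) = rs.foldl (fun s r => s + h r) c + e := by
  intro rs
  induction rs with
  | nil => intro c e; rfl
  | cons r rs ih =>
    intro c e
    simp only [List.foldl_cons]
    rw [show c + e + h r = c + h r + e by ring, ih]

-- inserting one key into the histogram bumps the 40-lookup sum by 1 iff the key is hit by the lookup row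
lemma score_insert (rs : List Int) (hnd : rs.Nodup) (f : Int → Int)
    (d : PySem.Dict (Int × Int) Int) (k : Int × Int) : ∀ (c : Int),
    rs.foldl (fun s r => s + (d.insert k (d.getD k 0 + 1)).getD (r, f r) 0) c =
      rs.foldl (fun s r => s + d.getD (r, f r) 0) c +
        (if k.1 ∈ rs ∧ k.2 = f k.1 then 1 else 0) := by
  obtain ⟨k1, k2⟩ := k
  induction rs with
  | nil => intro c; simp
  | cons r rs ih =>
    intro c
    have hnd' : rs.Nodup := hnd.of_cons
    have hr : r ∉ rs := (List.nodup_cons.mp hnd).1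
    simp only [List.foldl_cons]
    rw [ih hnd', PySem.Dict.getD_insert]
    simp only [List.mem_cons, Prod.mk.injEq]
    by_cases hk : r = k1 ∧ f r = k2
    · have hnotin : ¬(k1 ∈ rs ∧ k2 = f k1) := by
        intro ⟨hm, _⟩; exact hr (hk.1 ▸ hm)
      rw [if_pos hk, if_neg hnotin,
          if_pos (⟨Or.inl hk.1.symm, by rw [← hk.1]; exact hk.2.symm⟩ :
            (k1 = r ∨ k1 ∈ rs) ∧ k2 = f k1)]
      rw [← hk.1, ← hk.2,
          show c + (d.getD (r, f r) 0 + 1) = c + d.getD (r, f r) 0 + 1 by ring,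
          foldl_shift (fun r => d.getD (r, f r) 0)]
      ring
    · rw [if_neg hk]
      by_cases hc : (k1 = r ∨ k1 ∈ rs) ∧ k2 = f k1
      · have hin : k1 ∈ rs ∧ k2 = f k1 := by
          refine ⟨?_, hc.2⟩
          rcases hc.1 with h | h
          · exact absurd ⟨h.symm, by rw [← h]; exact hc.2.symm⟩ hk
          · exact h
        rw [if_pos hin, if_pos hc]
      · have hnin : ¬(k1 ∈ rs ∧ k2 = f k1) := by
          intro ⟨hm, he⟩; exact hc ⟨Or.inr hm, he⟩
        rw [if_neg hnin, if_neg hc]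

-- pattern[(i % 40) % len] = pattern[i % len] when len divides 40, as a lookup value
lemma lookup_at (g : List Int) (hg : 0 < g.length) (hdvd : (g.length : Int) ∣ 40) (i : Nat) :
    (PySem.List.pyGet? g (PySem.Int.mod (PySem.Int.mod (i : Int) 40) (g.length : Int))).getD 0 =
      g.getD (i % g.length) 0 := by
  have hglen : (0:Int) < (g.length : Int) := by exact_mod_cast hg
  have h1 : PySem.Int.mod (PySem.Int.mod (i : Int) 40) (g.length : Int) =
      ((i % g.length : Nat) : Int) := by
    show Int.fmod (Int.fmod (i : Int) 40) (g.length : Int) = ((i % g.length : Nat) : Int)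
    rw [Int.fmod_eq_emod, Int.fmod_eq_emod]
    simp [Int.le_of_lt hglen]
    rw [Int.emod_emod_of_dvd _ hdvd]
  rw [h1, PySem.List.pyGet?_natCast]
  have hlt : i % g.length < g.length := Nat.mod_lt i hg
  rw [List.getElem?_eq_getElem hlt, List.getD_eq_getElem?_getD, List.getElem?_eq_getElem hlt]

-- the histogram score of a pattern equals A's per-element hit count
lemma hist_score (g : List Int) (hg : 0 < g.length) (hdvd : (g.length : Int) ∣ 40)
    (l : List Int) :
    pyScore (histOf l) g =
      ((l.zipIdx.countP (fun p => p.1 = g.getD (p.2 % g.length) 0) : Nat) : Int) := by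
  induction l using List.reverseRecOn with
  | nil =>
    simp [pyScore, histOf, PySem.List.enumerate_nil, PySem.Dict.empty, PySem.Dict.getD,
      PySem.Dict.get?]
  | append_singleton l x ih =>
    have hhist : histOf (l ++ [x]) =
        (histOf l).insert (PySem.Int.mod ((l.length : Int)) 40, x)
          ((histOf l).getD (PySem.Int.mod ((l.length : Int)) 40, x) 0 + 1) := by
      simp [histOf, PySem.List.enumerate_append, PySem.List.enumerate_cons,
        PySem.List.enumerate_nil]
    have hmem : PySem.Int.mod ((l.length : Int)) 40 ∈ PySem.List.pyRange 0 40 1 := by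
      rw [PySem.List.mem_pyRange_one]
      show (0:Int) ≤ Int.fmod (l.length : Int) 40 ∧ Int.fmod (l.length : Int) 40 < 40
      rw [Int.fmod_eq_emod]
      simp
      omega
    have key := score_insert (PySem.List.pyRange 0 40 1) (PySem.List.nodup_pyRange_one 0 40)
      (fun r => (PySem.List.pyGet? g (PySem.Int.mod r (g.length : Int))).getD 0)
      (histOf l) (PySem.Int.mod ((l.length : Int)) 40, x) 0
    dsimp only at key
    rw [List.zipIdx_append, List.countP_append]
    simp only [List.zipIdx_cons, List.zipIdx_nil, List.countP_cons, List.countP_nil,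
      decide_eq_true_eq, Nat.zero_add]
    rw [hhist]
    unfold pyScore at ih ⊢
    rw [key, ih, lookup_at g hg hdvd l.length]
    by_cases hx : x = g.getD (l.length % g.length) 0
    · rw [if_pos ⟨hmem, hx⟩, if_pos hx]; push_cast; ring
    · rw [if_neg (fun hcon => hx hcon.2), if_neg hx]; push_cast; ring

-- the two tie-collecting tails agree for any threshold m
lemma tail_eq (m c1 c2 c3 : Int) :
    PySem.List.sorted ((PySem.List.enumerate [c1, c2, c3]).foldl
      (fun acc p => if m = p.2 then acc ++ [p.1 + 1] else acc) []) (fun x => x) false =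
    (([(1,c1),(2,c2),(3,c3)] : List (Int × Int)).filter (fun p => p.2 = m)).map (fun p => p.1) := by
  simp only [PySem.List.enumerate_cons, PySem.List.enumerate_nil, List.foldl, List.filter_cons,
    List.filter_nil, decide_eq_true_eq]
  split_ifs <;> first | omega | (simp; decide)

-- ===== VERDICT (by name: the statement is the Claim_ definition above) =====
theorem solution_spec : Claim_equal_solution := by
  intro answers _
  unfold Spec_solution solution solution_alt
  rw [foldA]
  simp only
  rw [hist_score [1,2,3,4,5] (by decide) (by decide),
      hist_score [2,1,2,3,2,4,2,5] (by decide) (by decide),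
      hist_score [3,3,1,1,2,2,4,4,5,5] (by decide) (by decide),
      ← countA_eq' [1,2,3,4,5] (by decide), ← countA_eq' [2,1,2,3,2,4,2,5] (by decide),
      ← countA_eq' [3,3,1,1,2,2,4,4,5,5] (by decide)]
  exact tail_eq _ _ _ _
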